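-- pv_equiv track=rewrite | github.com/ezsx/repo-semantic-mcp | services/repo_semantic/chunkers/markdown.py | _split_large_markdown_section
-- ===== SOURCE A (Python) =====
-- MAX_SECTION_CHARS = 2600
--
-- def _split_large_markdown_section(text: str) -> list[str]:
--     """Разбить длинную markdown-секцию на разумные подчанки."""
--
--     if len(text) <= MAX_SECTION_CHARS:
--         return [text]
--
--     parts: list[str] = []
--     current: list[str] = []
--     current_len = 0
--     for line in text.splitlines():
--         current.append(line)
--         current_len += len(line) + 1
--         if current_len >= MAX_SECTION_CHARS and line.strip() == "":
--             parts.append("\n".join(current).strip())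
--             current = []
--             current_len = 0
--
--     if current:
--         parts.append("\n".join(current).strip())
--     return [part for part in parts if part]
-- ===== SOURCE B (Python) =====
-- MAX_SECTION_CHARS = 2600
--
-- def _split_large_markdown_section(text: str) -> list[str]:
--     """Two-pass rewrite: group lines into blank-terminated blocks, then pack whole blocks greedily."""
--     if len(text) <= MAX_SECTION_CHARS:
--         return [text]
--
--     # pass 1: blocks of lines; each block carries its length contribution and
--     # whether it was closed by a blank line
--     blocks: list[tuple[list[str], int, bool]] = []
--     block: list[str] = []
--     block_len = 0
--     for line in text.splitlines():
--         block.append(line)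
--         block_len += len(line) + 1
--         if line.strip() == "":
--             blocks.append((block, block_len, True))
--             block = []
--             block_len = 0
--     if block:
--         blocks.append((block, block_len, False))
--
--     # pass 2: greedily accumulate whole blocks into chunks
--     parts: list[str] = []
--     chunk: list[str] = []
--     chunk_len = 0
--     for lines, blen, closed in blocks:
--         chunk += lines
--         chunk_len += blen
--         if closed and chunk_len >= MAX_SECTION_CHARS:
--             parts.append("\n".join(chunk).strip())
--             chunk = []
--             chunk_len = 0
--     if chunk:
--         parts.append("\n".join(chunk).strip())
--     return [p for p in parts if p]
-- ===== Notes on version B (the rewrite author's own statement) =====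
-- stated objective: alternative
-- what changed: Replaced the single line-by-line loop (which re-checks the flush condition on every line) by two passes: a first pass grouping the lines into blank-terminated blocks with their length contribution, and a second pass greedily packing whole blocks into chunks, flushing only at closed blocks.
import Mathlib
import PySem

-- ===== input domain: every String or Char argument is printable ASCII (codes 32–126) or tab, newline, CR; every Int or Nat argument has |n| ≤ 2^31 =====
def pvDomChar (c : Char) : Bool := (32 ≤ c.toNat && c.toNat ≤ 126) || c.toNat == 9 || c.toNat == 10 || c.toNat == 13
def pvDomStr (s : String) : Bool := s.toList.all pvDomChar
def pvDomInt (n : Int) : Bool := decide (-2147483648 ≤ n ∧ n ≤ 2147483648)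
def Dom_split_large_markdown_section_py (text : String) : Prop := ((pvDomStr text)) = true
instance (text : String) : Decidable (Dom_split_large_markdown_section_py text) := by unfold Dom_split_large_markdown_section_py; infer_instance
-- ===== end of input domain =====

-- B is an alternative decomposition (two passes: blank-terminated blocks, then greedy packing of whole blocks); same cost, equal return value.

-- ===== PORT A =====
-- one line-by-line loop, flushing at a blank line once the running length reaches 2600
def aStep (st : List String × List String × Int) (line : String) : List String × List String × Int :=
  let current := st.2.1 ++ [line]
  let cl := st.2.2 + PySem.Str.len line + 1
  if 2600 ≤ cl ∧ PySem.Str.strip line = "" then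
    (st.1 ++ [PySem.Str.strip (PySem.Str.join "\n" current)], [], 0)
  else (st.1, current, cl)

def split_large_markdown_section_py (text : String) : List String :=
  if PySem.Str.len text ≤ 2600 then [text]
  else
    let st := (PySem.Str.splitlines text).foldl aStep ([], [], 0)
    let parts := if st.2.1 ≠ [] then st.1 ++ [PySem.Str.strip (PySem.Str.join "\n" st.2.1)] else st.1
    parts.filter (fun p => !(p == ""))

-- ===== PORT B =====
-- pass 1: group lines into blocks (lines, length contribution, closed-by-blank-line flag)
def bGroupStep (st : List (List String × Int × Bool) × List String × Int) (line : String) :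
    List (List String × Int × Bool) × List String × Int :=
  let block := st.2.1 ++ [line]
  let blen := st.2.2 + PySem.Str.len line + 1
  if PySem.Str.strip line = "" then (st.1 ++ [(block, blen, true)], [], 0)
  else (st.1, block, blen)

-- pass 2: greedily accumulate whole blocks; flush only after a closed block
def bPackStep (st : List String × List String × Int) (b : List String × Int × Bool) :
    List String × List String × Int :=
  let chunk := st.2.1 ++ b.1
  let cl := st.2.2 + b.2.1
  if b.2.2 = true ∧ 2600 ≤ cl then
    (st.1 ++ [PySem.Str.strip (PySem.Str.join "\n" chunk)], [], 0)
  else (st.1, chunk, cl)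

def split_large_markdown_section_py_alt (text : String) : List String :=
  if PySem.Str.len text ≤ 2600 then [text]
  else
    let g := (PySem.Str.splitlines text).foldl bGroupStep ([], [], 0)
    let blocks := if g.2.1 ≠ [] then g.1 ++ [(g.2.1, g.2.2, false)] else g.1
    let st := blocks.foldl bPackStep ([], [], 0)
    let parts := if st.2.1 ≠ [] then st.1 ++ [PySem.Str.strip (PySem.Str.join "\n" st.2.1)] else st.1
    parts.filter (fun p => !(p == ""))

-- ===== PRECONDITION & SPEC =====
def Spec_split_large_markdown_section_py (text : String) (out : List String) : Prop := out = split_large_markdown_section_py_alt text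
instance (text : String) (out : List String) : Decidable (Spec_split_large_markdown_section_py text out) := by unfold Spec_split_large_markdown_section_py; infer_instance

-- ===== CLAIM (what is proved, stated in full; the proofs are below) =====
def Claim_equal_split_large_markdown_section_py : Prop := ∀ (text : String), Dom_split_large_markdown_section_py text → Spec_split_large_markdown_section_py text (split_large_markdown_section_py text)

-- ===== LEMMAS AND PROOFS =====

-- grouping: an already-emitted block list just prefixes the result
theorem g_acc (lines : List String) : ∀ bs pb pl,
    lines.foldl bGroupStep (bs, pb, pl) =
      ((bs ++ (lines.foldl bGroupStep ([], pb, pl)).1), (lines.foldl bGroupStep ([], pb, pl)).2) := by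
  induction lines with
  | nil => intro bs pb pl; simp
  | cons line rest ih =>
    intro bs pb pl
    simp only [List.foldl_cons, bGroupStep]
    split_ifs with h
    · simp only [List.nil_append]
      rw [ih (bs ++ [(pb ++ [line], pl + PySem.Str.len line + 1, true)]) [] 0,
          ih [(pb ++ [line], pl + PySem.Str.len line + 1, true)] [] 0]
      simp
    · exact ih bs (pb ++ [line]) (pl + PySem.Str.len line + 1)

-- A's loop = grouping then packing, with the still-open block carried separately
theorem main_lemma (lines : List String) : ∀ (p cC : List String) (cL : Int) (pb : List String) (pl : Int),
    lines.foldl aStep (p, cC ++ pb, cL + pl) =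
      (((lines.foldl bGroupStep ([], pb, pl)).1.foldl bPackStep (p, cC, cL)).1,
       ((lines.foldl bGroupStep ([], pb, pl)).1.foldl bPackStep (p, cC, cL)).2.1 ++ (lines.foldl bGroupStep ([], pb, pl)).2.1,
       ((lines.foldl bGroupStep ([], pb, pl)).1.foldl bPackStep (p, cC, cL)).2.2 + (lines.foldl bGroupStep ([], pb, pl)).2.2) := by
  induction lines with
  | nil => intro p cC cL pb pl; simp
  | cons line rest ih =>
    intro p cC cL pb pl
    simp only [List.foldl_cons, aStep, bGroupStep]
    by_cases hb : PySem.Str.strip line = ""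
    · rw [if_pos hb]
      simp only [List.nil_append]
      rw [g_acc rest [(pb ++ [line], pl + PySem.Str.len line + 1, true)] [] 0]
      simp only [List.singleton_append, List.foldl_cons, bPackStep]
      by_cases hc : (2600 : Int) ≤ cL + pl + PySem.Str.len line + 1
      · rw [if_pos ⟨hc, hb⟩, if_pos ⟨trivial, by omega⟩]
        have h1 : cC ++ pb ++ [line] = cC ++ (pb ++ [line]) := by simp
        rw [h1]
        have := ih (p ++ [PySem.Str.strip (PySem.Str.join "\n" (cC ++ (pb ++ [line])))]) [] 0 [] 0
        simp only [List.append_nil, add_zero] at this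
        exact this
      · rw [if_neg (by rintro ⟨h1, -⟩; omega), if_neg (by rintro ⟨-, h2⟩; omega)]
        have h1 : cC ++ pb ++ [line] = cC ++ (pb ++ [line]) := by simp
        have h2 : cL + pl + PySem.Str.len line + 1 = cL + (pl + PySem.Str.len line + 1) := by ring
        rw [h1, h2]
        have := ih p (cC ++ (pb ++ [line])) (cL + (pl + PySem.Str.len line + 1)) [] 0
        simp only [List.append_nil, add_zero] at this
        exact this
    · rw [if_neg (by rintro ⟨-, h2⟩; exact hb h2), if_neg hb]
      have h1 : cC ++ pb ++ [line] = cC ++ (pb ++ [line]) := by simp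
      have h2 : cL + pl + PySem.Str.len line + 1 = cL + (pl + PySem.Str.len line + 1) := by ring
      rw [h1, h2]
      exact ih p cC cL (pb ++ [line]) (pl + PySem.Str.len line + 1)

-- ===== VERDICT (by name: the statement is the Claim_ definition above) =====
theorem split_large_markdown_section_py_spec : Claim_equal_split_large_markdown_section_py := by
  intro text _
  unfold Spec_split_large_markdown_section_py split_large_markdown_section_py split_large_markdown_section_py_alt
  by_cases hlen : PySem.Str.len text ≤ 2600
  · rw [if_pos hlen, if_pos hlen]
  · rw [if_neg hlen, if_neg hlen]
    have hm := main_lemma (PySem.Str.splitlines text) [] [] 0 [] 0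
    simp only [List.nil_append, add_zero] at hm
    by_cases hpb : ((PySem.Str.splitlines text).foldl bGroupStep ([], [], 0)).2.1 = []
    · simp only [hm, hpb, ne_eq, not_true_eq_false, if_false, List.append_nil]
    · simp only [hm, hpb, ne_eq, not_false_eq_true, if_true, List.foldl_append,
        List.foldl_cons, List.foldl_nil, bPackStep, Bool.false_eq_true, false_and, if_false]
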